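-- pv_equiv track=rewrite | github.com/DarkAce65/advent-of-code | 2024/day5.py | is_correctly_ordered
-- ===== SOURCE A (Python) =====
-- from collections import defaultdict
--
-- def filter_dependencies(
--     print_order: list[int], dependencies: dict[int, set[int]]
-- ) -> dict[int, set[int]]:
--     pages_to_print = set(print_order)
--     filtered_dependencies: dict[int, set[int]] = defaultdict(set)
--     for page in dependencies.keys():
--         if page not in pages_to_print:
--             continue
--         for dependent in dependencies[page]:
--             if dependent in pages_to_print:
--                 filtered_dependencies[page].add(dependent)
--
--     return filtered_dependencies
--
-- def is_correctly_ordered(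
--     print_order: list[int], dependencies: dict[int, set[int]]
-- ) -> bool:
--     filtered_dependencies = filter_dependencies(print_order, dependencies)
--
--     printed: set[int] = set()
--     for page in print_order:
--         for dependency in filtered_dependencies[page]:
--             if dependency not in printed:
--                 return False
--         printed.add(page)
--
--     return True
-- ===== SOURCE B (Python) =====
-- def is_correctly_ordered(print_order, dependencies):
--     index = {}
--     for i, page in enumerate(print_order):
--         if page not in index:
--             index[page] = i
--     for page, deps in dependencies.items():
--         if page in index:
--             for dep in deps:
--                 if dep in index and index[dep] >= index[page]:
--                     return False
--     return True
-- ===== Notes on version B (the rewrite author's own statement) =====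
-- stated objective: alternative
-- what changed: Replaces A's pages-set filtering pass plus forward scan with a running 'printed' set by a first-occurrence index table built once over print_order, then a single pass over the rules comparing positions (index[dep] < index[page]).
import Mathlib
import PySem

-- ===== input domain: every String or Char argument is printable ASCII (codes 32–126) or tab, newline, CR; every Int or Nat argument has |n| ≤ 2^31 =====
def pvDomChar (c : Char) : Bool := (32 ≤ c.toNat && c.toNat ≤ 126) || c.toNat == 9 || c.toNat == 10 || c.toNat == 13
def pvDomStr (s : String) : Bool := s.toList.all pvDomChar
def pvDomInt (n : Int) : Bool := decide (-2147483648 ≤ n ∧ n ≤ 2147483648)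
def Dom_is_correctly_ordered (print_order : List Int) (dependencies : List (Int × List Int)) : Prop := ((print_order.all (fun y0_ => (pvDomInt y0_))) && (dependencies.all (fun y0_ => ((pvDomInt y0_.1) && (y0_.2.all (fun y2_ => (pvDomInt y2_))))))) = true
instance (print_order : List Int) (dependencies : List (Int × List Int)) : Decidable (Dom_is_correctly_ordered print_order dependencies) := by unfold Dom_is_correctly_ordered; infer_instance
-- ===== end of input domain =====

-- B replaces A's pages-set filtering pass plus running 'printed'-set scan by a first-occurrence
-- index table over print_order checked in one pass over the rules (different decomposition).

-- ===== PORT A =====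
-- filter_dependencies: keep only rules between pages that appear in print_order (defaultdict(set))

def pvFilterDeps (print_order : List Int) (dependencies : List (Int × List Int)) : PySem.Dict Int (List Int) :=
  let pages : PySem.Set Int := PySem.Set.ofList print_order
  dependencies.foldl (fun fd pr =>
    if PySem.Set.contains pages pr.1 then
      pr.2.foldl (fun fd2 dep =>
        if PySem.Set.contains pages dep then
          PySem.Dict.modify fd2 pr.1 [] (fun s => PySem.Set.add s dep)
        else fd2) fd
    else fd) PySem.Dict.empty

-- the main loop over print_order with the running 'printed' set (early 'return False' = .all)

def pvGoA (filtered : PySem.Dict Int (List Int)) : PySem.Set Int → List Int → Bool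
  | _, [] => true
  | printed, page :: rest =>
    if (PySem.Dict.getD filtered page []).all (fun dep => PySem.Set.contains printed dep)
    then pvGoA filtered (PySem.Set.add printed page) rest
    else false

def is_correctly_ordered (print_order : List Int) (dependencies : List (Int × List Int)) : Bool :=
  pvGoA (pvFilterDeps print_order dependencies) PySem.Set.empty print_order

-- ===== PORT B =====
-- first-occurrence index of each page in print_order (do not overwrite on duplicates)

def pvBuildIndex (print_order : List Int) : PySem.Dict Int Int :=
  (PySem.List.enumerate print_order 0).foldl
    (fun d ip => if PySem.Dict.contains d ip.2 then d else PySem.Dict.insert d ip.2 ip.1)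
    PySem.Dict.empty

def is_correctly_ordered_alt (print_order : List Int) (dependencies : List (Int × List Int)) : Bool :=
  let idx := pvBuildIndex print_order
  dependencies.all (fun pr =>
    match PySem.Dict.get? idx pr.1 with
    | none => true
    | some ip => pr.2.all (fun dep =>
        match PySem.Dict.get? idx dep with
        | none => true
        | some iq => decide (iq < ip)))

-- ===== PRECONDITION & SPEC =====
def Spec_is_correctly_ordered (print_order : List Int) (dependencies : List (Int × List Int)) (out : Bool) : Prop := out = is_correctly_ordered_alt print_order dependencies
instance (print_order : List Int) (dependencies : List (Int × List Int)) (out : Bool) : Decidable (Spec_is_correctly_ordered print_order dependencies out) := by unfold Spec_is_correctly_ordered; infer_instance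

-- ===== CLAIM (what is proved, stated in full; the proofs are below) =====
def Claim_equal_is_correctly_ordered : Prop := ∀ (print_order : List Int) (dependencies : List (Int × List Int)), Dom_is_correctly_ordered print_order dependencies → Spec_is_correctly_ordered print_order dependencies (is_correctly_ordered print_order dependencies)

-- ===== LEMMAS AND PROOFS =====

-- B's index dict is first-occurrence lookup in print_order

lemma pvBuildIndex_go (l : List Int) : ∀ (s : Int) (d : PySem.Dict Int Int) (x : Int),
    ((PySem.List.enumerate l s).foldl
      (fun d ip => if PySem.Dict.contains d ip.2 then d else PySem.Dict.insert d ip.2 ip.1) d).get? x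
    = if d.contains x then d.get? x else if x ∈ l then some (s + (l.idxOf x : Int)) else none := by
  induction l with
  | nil =>
    intro s d x
    simp only [PySem.List.enumerate_nil, List.foldl_nil, List.not_mem_nil, if_false]
    by_cases hdx : d.contains x = true
    · simp [hdx]
    · rw [if_neg hdx, PySem.Dict.get?_eq_none_iff_contains]; simpa using hdx
  | cons a t ih =>
    intro s d x
    rw [PySem.List.enumerate_cons, List.foldl_cons]
    by_cases hda : d.contains a = true
    · rw [if_pos hda, ih (s+1) d x]
      by_cases hdx : d.contains x = true
      · simp [hdx]
      · simp only [hdx]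
        by_cases hax : x = a
        · -- x = a : a ∈ d? no wait d.contains a true but d.contains x false contradicts x = a
          exact absurd (hax ▸ hda) (by simp [hdx])
        · rw [List.idxOf_cons_ne t (fun h => hax h.symm)]
          by_cases hxt : x ∈ t
          · simp [hxt, hax]; ring
          · simp [hxt, hax]
    · rw [if_neg hda, ih (s+1) (d.insert a s) x]
      by_cases hax : x = a
      · subst hax
        simp [PySem.Dict.contains_insert_self, PySem.Dict.get?_insert_self, hda,
          List.idxOf_cons_self]
      · rw [PySem.Dict.contains_insert, PySem.Dict.get?_insert]
        simp only [hax, if_false]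
        by_cases hdx : d.contains x = true
        · simp [hdx]
        · simp only [hdx, Bool.or_false]
          rw [List.idxOf_cons_ne t (fun h => hax h.symm)]
          by_cases hxt : x ∈ t
          · simp [hxt, hax]; ring
          · simp [hxt, hax]

lemma pvBuildIndex_get? (po : List Int) (x : Int) :
    (pvBuildIndex po).get? x = if x ∈ po then some ((po.idxOf x : Nat) : Int) else none := by
  rw [pvBuildIndex, pvBuildIndex_go]
  simp [PySem.Dict.contains_empty]

-- membership in A's filtered dependency sets

lemma pvInner_mem (pages : PySem.Set Int) (k : Int) :
    ∀ (ds : List Int) (fd : PySem.Dict Int (List Int)) (j y : Int),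
    (y ∈ (ds.foldl (fun fd2 dep =>
        if PySem.Set.contains pages dep then
          PySem.Dict.modify fd2 k [] (fun s => PySem.Set.add s dep)
        else fd2) fd).getD j []
      ↔ y ∈ fd.getD j [] ∨ (j = k ∧ ∃ d ∈ ds, d = y ∧ PySem.Set.contains pages y = true)) := by
  intro ds
  induction ds with
  | nil => intro fd j y; simp
  | cons a t ih =>
    intro fd j y
    rw [List.foldl_cons]
    by_cases ha : PySem.Set.contains pages a = true
    · rw [if_pos ha, ih]
      by_cases hjk : j = k
      · subst hjk
        rw [PySem.Dict.getD_modify_self, PySem.Set.add_eq_ite]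
        by_cases hmem : a ∈ fd.getD j []
        · rw [if_pos hmem]
          constructor
          · rintro (h | ⟨-, d, hd, rfl, hy⟩)
            · exact Or.inl h
            · exact Or.inr ⟨rfl, d, by simp [hd], rfl, hy⟩
          · rintro (h | ⟨-, d, hd, rfl, hy⟩)
            · exact Or.inl h
            · rcases List.mem_cons.mp hd with rfl | hd
              · exact Or.inl hmem
              · exact Or.inr ⟨rfl, d, hd, rfl, hy⟩
        · rw [if_neg hmem]
          simp only [List.mem_append, List.mem_cons, List.not_mem_nil, or_false]
          constructor
          · rintro ((h | rfl) | ⟨-, d, hd, rfl, hy⟩)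
            · exact Or.inl h
            · exact Or.inr ⟨trivial, y, Or.inl rfl, rfl, ha⟩
            · exact Or.inr ⟨trivial, d, Or.inr hd, rfl, hy⟩
          · rintro (h | ⟨-, d, hd, rfl, hy⟩)
            · exact Or.inl (Or.inl h)
            · rcases hd with rfl | hd
              · exact Or.inl (Or.inr rfl)
              · exact Or.inr ⟨trivial, d, hd, rfl, hy⟩
      · rw [PySem.Dict.getD_modify, if_neg hjk]
        constructor
        · rintro (h | ⟨rfl, _⟩)
          · exact Or.inl h
          · exact absurd rfl hjk
        · rintro (h | ⟨rfl, _⟩)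
          · exact Or.inl h
          · exact absurd rfl hjk
    · rw [if_neg ha, ih]
      constructor
      · rintro (h | ⟨rfl, d, hd, rfl, hy⟩)
        · exact Or.inl h
        · exact Or.inr ⟨rfl, d, List.mem_cons_of_mem _ hd, rfl, hy⟩
      · rintro (h | ⟨rfl, d, hd, rfl, hy⟩)
        · exact Or.inl h
        · rcases List.mem_cons.mp hd with rfl | hd
          · exact absurd hy ha
          · exact Or.inr ⟨rfl, d, hd, rfl, hy⟩

lemma pvOuter_mem (pages : PySem.Set Int) :
    ∀ (l : List (Int × List Int)) (fd : PySem.Dict Int (List Int)) (j y : Int),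
    (y ∈ (l.foldl (fun fd pr =>
        if PySem.Set.contains pages pr.1 then
          pr.2.foldl (fun fd2 dep =>
            if PySem.Set.contains pages dep then
              PySem.Dict.modify fd2 pr.1 [] (fun s => PySem.Set.add s dep)
            else fd2) fd
        else fd) fd).getD j []
      ↔ y ∈ fd.getD j [] ∨ ∃ pr ∈ l, pr.1 = j ∧ PySem.Set.contains pages pr.1 = true
          ∧ y ∈ pr.2 ∧ PySem.Set.contains pages y = true) := by
  intro l
  induction l with
  | nil => intro fd j y; simp
  | cons a t ih =>
    intro fd j y
    rw [List.foldl_cons]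
    by_cases ha : PySem.Set.contains pages a.1 = true
    · rw [if_pos ha, ih, pvInner_mem]
      constructor
      · rintro ((h | ⟨rfl, d, hd, rfl, hy⟩) | ⟨pr, hpr, rfl, hc, hmem, hy⟩)
        · exact Or.inl h
        · exact Or.inr ⟨a, List.mem_cons_self, rfl, ha, hd, hy⟩
        · exact Or.inr ⟨pr, List.mem_cons_of_mem _ hpr, rfl, hc, hmem, hy⟩
      · rintro (h | ⟨pr, hpr, rfl, hc, hmem, hy⟩)
        · exact Or.inl (Or.inl h)
        · rcases List.mem_cons.mp hpr with rfl | hpr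
          · exact Or.inl (Or.inr ⟨rfl, y, hmem, rfl, hy⟩)
          · exact Or.inr ⟨pr, hpr, rfl, hc, hmem, hy⟩
    · rw [if_neg ha, ih]
      constructor
      · rintro (h | ⟨pr, hpr, rfl, hc, hmem, hy⟩)
        · exact Or.inl h
        · exact Or.inr ⟨pr, List.mem_cons_of_mem _ hpr, rfl, hc, hmem, hy⟩
      · rintro (h | ⟨pr, hpr, rfl, hc, hmem, hy⟩)
        · exact Or.inl h
        · rcases List.mem_cons.mp hpr with rfl | hpr
          · exact absurd hc ha
          · exact Or.inr ⟨pr, hpr, rfl, hc, hmem, hy⟩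

lemma pvFilterDeps_mem (po : List Int) (deps : List (Int × List Int)) (j y : Int) :
    y ∈ (pvFilterDeps po deps).getD j []
      ↔ ∃ pr ∈ deps, pr.1 = j ∧ j ∈ po ∧ y ∈ pr.2 ∧ y ∈ po := by
  rw [pvFilterDeps]
  rw [pvOuter_mem]
  simp only [PySem.Dict.getD_empty, List.not_mem_nil, false_or]
  constructor
  · rintro ⟨pr, hpr, rfl, hc, hmem, hy⟩
    exact ⟨pr, hpr, rfl,
      (PySem.Set.mem_ofList _ _).mp ((PySem.Set.contains_iff _ _).mp hc),
      hmem, (PySem.Set.mem_ofList _ _).mp ((PySem.Set.contains_iff _ _).mp hy)⟩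
  · rintro ⟨pr, hpr, rfl, hc, hmem, hy⟩
    exact ⟨pr, hpr, rfl,
      (PySem.Set.contains_iff _ _).mpr ((PySem.Set.mem_ofList _ _).mpr hc),
      hmem, (PySem.Set.contains_iff _ _).mpr ((PySem.Set.mem_ofList _ _).mpr hy)⟩

-- A's main loop succeeds iff before each occurrence of a page all its filtered dependencies already appeared (or were pre-printed)

lemma pvGoA_iff (F : PySem.Dict Int (List Int)) : ∀ (l : List Int) (printed : PySem.Set Int),
    (pvGoA F printed l = true
      ↔ ∀ l1 p l2, l = l1 ++ p :: l2 → ∀ y ∈ F.getD p [], y ∈ printed ∨ y ∈ l1) := by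
  intro l
  induction l with
  | nil =>
    intro printed
    simp only [pvGoA, true_iff]
    intro l1 p l2 h
    exact absurd h (by simp)
  | cons a t ih =>
    intro printed
    rw [pvGoA]
    by_cases hall : (F.getD a []).all (fun dep => PySem.Set.contains printed dep) = true
    · rw [if_pos hall, ih]
      constructor
      · intro h l1 p l2 hsp y hy
        rcases l1 with _ | ⟨b, l1'⟩
        · obtain ⟨rfl, rfl⟩ : a = p ∧ t = l2 := by
            simpa using hsp
          exact Or.inl ((PySem.Set.contains_iff _ _).mp (List.all_eq_true.mp hall y hy))
        · obtain ⟨rfl, ht⟩ : a = b ∧ t = l1' ++ p :: l2 := by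
            simpa using hsp
          rcases h l1' p l2 ht y hy with hin | hin
          · rcases (PySem.Set.mem_add _ _ _).mp hin with hin | rfl
            · exact Or.inl hin
            · exact Or.inr List.mem_cons_self
          · exact Or.inr (List.mem_cons_of_mem _ hin)
      · intro h l1 p l2 hsp y hy
        rcases h (a :: l1) p l2 (by rw [hsp]; simp) y hy with hin | hin
        · exact Or.inl ((PySem.Set.mem_add _ _ _).mpr (Or.inl hin))
        · rcases List.mem_cons.mp hin with rfl | hin
          · exact Or.inl ((PySem.Set.mem_add _ _ _).mpr (Or.inr rfl))
          · exact Or.inr hin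
    · rw [if_neg hall]
      simp only [Bool.false_eq_true, false_iff]
      intro h
      apply hall
      rw [List.all_eq_true]
      intro y hy
      rcases h [] a t rfl y hy with hin | hin
      · exact (PySem.Set.contains_iff _ _).mpr hin
      · exact absurd hin (by simp)

-- 'appears before every occurrence' is a first-occurrence index comparison

lemma split_iff_idx (po : List Int) (p y : Int) (hp : p ∈ po) (hy : y ∈ po) :
    (∀ l1 l2, po = l1 ++ p :: l2 → y ∈ l1) ↔ po.idxOf y < po.idxOf p := by
  constructor
  · intro h
    have hlt := List.idxOf_lt_length_of_mem hp
    have hsplit : po = po.take (po.idxOf p) ++ p :: po.drop (po.idxOf p + 1) := by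
      conv_lhs => rw [← List.take_append_drop (po.idxOf p) po]
      rw [List.drop_eq_getElem_cons hlt, List.getElem_idxOf hlt]
    have := h _ _ hsplit
    exact (List.mem_take_iff_idxOf_lt hy).mp this
  · intro h l1 l2 hsp
    have hle : po.idxOf p ≤ l1.length := by
      by_cases hpl : p ∈ l1
      · rw [hsp, List.idxOf_append_of_mem hpl]
        exact le_of_lt (List.idxOf_lt_length_of_mem hpl)
      · rw [hsp, List.idxOf_append_of_notMem hpl, List.idxOf_cons_self]
        omega
    have : y ∈ po.take l1.length := (List.mem_take_iff_idxOf_lt hy).mpr (by omega)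
    rw [hsp, List.take_left] at this
    exact this

-- both ports decide the same index condition

lemma alt_iff (po : List Int) (deps : List (Int × List Int)) :
    is_correctly_ordered_alt po deps = true
      ↔ ∀ pr ∈ deps, pr.1 ∈ po → ∀ y ∈ pr.2, y ∈ po → po.idxOf y < po.idxOf pr.1 := by
  simp only [is_correctly_ordered_alt, List.all_eq_true]
  constructor
  · intro h pr hpr hp y hy hyo
    have h1 := h pr hpr
    rw [pvBuildIndex_get?, if_pos hp] at h1
    have h2 := List.all_eq_true.mp h1 y hy
    rw [pvBuildIndex_get?, if_pos hyo] at h2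
    exact_mod_cast of_decide_eq_true h2
  · intro h pr hpr
    rw [pvBuildIndex_get?]
    by_cases hp : pr.1 ∈ po
    · rw [if_pos hp]
      rw [List.all_eq_true]
      intro y hy
      rw [pvBuildIndex_get?]
      by_cases hyo : y ∈ po
      · rw [if_pos hyo]
        exact decide_eq_true (by exact_mod_cast h pr hpr hp y hy hyo)
      · rw [if_neg hyo]
    · rw [if_neg hp]

lemma a_iff (po : List Int) (deps : List (Int × List Int)) :
    is_correctly_ordered po deps = true
      ↔ ∀ pr ∈ deps, pr.1 ∈ po → ∀ y ∈ pr.2, y ∈ po → po.idxOf y < po.idxOf pr.1 := by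
  rw [is_correctly_ordered, pvGoA_iff]
  constructor
  · intro h pr hpr hp y hy hyo
    have key : ∀ l1 l2, po = l1 ++ pr.1 :: l2 → y ∈ l1 := by
      intro l1 l2 hsp
      rcases h l1 pr.1 l2 hsp y
          ((pvFilterDeps_mem po deps pr.1 y).mpr ⟨pr, hpr, rfl, hp, hy, hyo⟩) with hin | hin
      · exact absurd hin (by simp [PySem.Set.empty])
      · exact hin
    exact (split_iff_idx po pr.1 y hp hyo).mp key
  · intro h l1 p l2 hsp y hy
    obtain ⟨pr, hpr, rfl, hp, hmem, hyo⟩ := (pvFilterDeps_mem po deps p y).mp hy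
    exact Or.inr (((split_iff_idx po pr.1 y hp hyo).mpr (h pr hpr hp y hmem hyo)) l1 l2 hsp)

-- ===== VERDICT (by name: the statement is the Claim_ definition above) =====
theorem is_correctly_ordered_spec : Claim_equal_is_correctly_ordered := by
  intro po deps _
  unfold Spec_is_correctly_ordered
  rw [Bool.eq_iff_iff, a_iff, alt_iff]
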